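-- pv_equiv track=rewrite | github.com/Adomnana/PERFORMANCE-LAB-MAIN | Task 1/task1.py | path_for
-- ===== SOURCE A (Python) =====
-- def path_for(n: int, m: int) -> str:
--     """
--     Compute the path (concatenated start positions) for a circular array 1..n
--     where each interval has length m and the next interval starts at the end
--     of the previous interval. Stop when an interval ends at element 1.
--     """
--     if n <= 0 or m <= 0:
--         raise ValueError("n and m must be positive integers")
--
--     starts = []
--     s = 1
--     while True:
--         starts.append(str(s))
--         # end = ((s - 1) + (m - 1)) % n + 1
--         end = ((s + m - 2) % n) + 1
--         if end == 1:
--             break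
--         s = end
--     return "".join(starts)
-- ===== SOURCE B (Python) =====
-- def path_for(n: int, m: int) -> str:
--     if n <= 0 or m <= 0:
--         raise ValueError("n and m must be positive integers")
--     step = (m - 1) % n
--     a, b = n, step
--     while b:
--         a, b = b, a % b
--     count = n // a
--     return "".join(str(k * step % n + 1) for k in range(count))
-- ===== Notes on version B (the rewrite author's own statement) =====
-- stated objective: alternative
-- what changed: A walks the circular array appending each interval start until the walk returns to position 1; B computes the orbit length in closed form as n // gcd(n, (m-1) % n) via a Euclid loop and emits the start positions by direct indexing k*step % n + 1.
import Mathlib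
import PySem

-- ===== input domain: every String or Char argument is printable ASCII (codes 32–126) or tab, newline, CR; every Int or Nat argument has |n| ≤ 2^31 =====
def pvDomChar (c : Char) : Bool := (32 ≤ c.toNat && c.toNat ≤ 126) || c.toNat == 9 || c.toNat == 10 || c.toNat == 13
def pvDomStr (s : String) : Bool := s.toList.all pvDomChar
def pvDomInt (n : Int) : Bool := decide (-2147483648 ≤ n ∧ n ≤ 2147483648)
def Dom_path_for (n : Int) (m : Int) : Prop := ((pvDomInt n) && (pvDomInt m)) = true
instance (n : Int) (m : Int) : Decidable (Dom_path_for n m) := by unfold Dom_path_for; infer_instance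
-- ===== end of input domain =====

-- B replaces A's "walk until the interval ends at 1" loop by the closed-form orbit size
-- n // gcd(n, (m-1) % n) and emits the start positions by direct indexing (objective: alternative).

-- ===== PORT A =====
-- A's while-True loop; the fuel only makes it total (n.toNat steps always suffice, proved below)
def pathLoopA (n m : Int) (fuel : Nat) (s : Int) (starts : List String) : List String :=
  match fuel with
  | 0 => starts
  | Nat.succ f =>
    let starts' := starts ++ [PySem.Int.toStr s]
    let e := PySem.Int.mod (s + m - 2) n + 1
    if e = 1 then starts' else pathLoopA n m f e starts'

def path_for (n : Int) (m : Int) : String :=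
  if n ≤ 0 ∨ m ≤ 0 then ""   -- Python raises ValueError here; excluded by Pre_path_for
  else PySem.Str.join "" (pathLoopA n m n.toNat 1 [])

-- ===== PORT B =====
-- Source B's hand-written Euclid loop `while b: a, b = b, a % b`; the 0 < b guard is the
-- totality form of Python's `while b` (b is never negative on any reachable call)
def euclidB (a b : Int) : Int :=
  if _h : 0 < b then euclidB b (PySem.Int.mod a b) else a
termination_by b.toNat
decreasing_by
  have h2 := PySem.Int.mod_lt a _h
  omega

def path_for_alt (n : Int) (m : Int) : String :=
  if n ≤ 0 ∨ m ≤ 0 then ""   -- Python raises ValueError here; excluded by Pre_path_for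
  else
    let step := PySem.Int.mod (m - 1) n
    let g := euclidB n step
    let count := PySem.Int.floordiv n g
    PySem.Str.join ""
      ((PySem.List.pyRange 0 count 1).map (fun k => PySem.Int.toStr (PySem.Int.mod (k * step) n + 1)))

-- ===== PRECONDITION & SPEC =====
-- Pre_ excludes exactly the inputs where A raises ValueError (n ≤ 0 or m ≤ 0)
def Pre_path_for (n : Int) (m : Int) : Prop := 0 < n ∧ 0 < m
instance (n : Int) (m : Int) : Decidable (Pre_path_for n m) := by unfold Pre_path_for; infer_instance
def pvWitness_path_for : Int × Int := (6, 4)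

def Spec_path_for (n : Int) (m : Int) (out : String) : Prop := out = path_for_alt n m
instance (n : Int) (m : Int) (out : String) : Decidable (Spec_path_for n m out) := by unfold Spec_path_for; infer_instance

-- ===== CLAIM (what is proved, stated in full; the proofs are below) =====
def Claim_equal_path_for : Prop := ∀ (n : Int) (m : Int), Dom_path_for n m → Pre_path_for n m → Spec_path_for n m (path_for n m)

-- ===== LEMMAS AND PROOFS =====

lemma dvd_mul_iff_orbit (N st : Nat) (hN : 0 < N) (k : Nat) :
    N ∣ k * st ↔ (N / Nat.gcd N st) ∣ k := by
  have key : ∀ g N' s' : Nat, 0 < g → N = g * N' → st = g * s' → Nat.Coprime N' s' →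
      (N ∣ k * st ↔ N' ∣ k) := by
    intro g N' s' hg hN' hs' hco
    constructor
    · intro h
      rw [hN', hs'] at h
      have h' : g * N' ∣ g * (k * s') := by
        have : k * (g * s') = g * (k * s') := by ring
        rwa [this] at h
      exact Nat.Coprime.dvd_of_dvd_mul_right hco ((Nat.mul_dvd_mul_iff_left hg).mp h')
    · intro h
      rw [hN', hs']
      have h1 : g * N' ∣ g * k := mul_dvd_mul_left g h
      have h2 : g * k ∣ k * (g * s') := Dvd.intro s' (by ring)
      exact dvd_trans h1 h2
  have hgpos : 0 < Nat.gcd N st := Nat.gcd_pos_of_pos_left st hN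
  have h1 : N = Nat.gcd N st * (N / Nat.gcd N st) := (Nat.mul_div_cancel' (Nat.gcd_dvd_left N st)).symm
  have h2 : st = Nat.gcd N st * (st / Nat.gcd N st) := (Nat.mul_div_cancel' (Nat.gcd_dvd_right N st)).symm
  exact key _ _ _ hgpos h1 h2 (Nat.coprime_div_gcd_div_gcd hgpos)

lemma euclidB_gcd (a b : Int) : 0 ≤ a → 0 ≤ b → euclidB a b = (Nat.gcd a.toNat b.toNat : Int) := by
  induction a, b using euclidB.induct with
  | case1 a b h ih =>
    intro ha hb
    rw [euclidB, dif_pos h]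
    have hmod : PySem.Int.mod a b = a % b := PySem.Int.mod_eq_emod_of_pos (a := a) h
    have hmnn : 0 ≤ PySem.Int.mod a b := PySem.Int.mod_nonneg a h
    rw [ih hb hmnn]
    congr 1
    have htn : (PySem.Int.mod a b).toNat = a.toNat % b.toNat := by
      have hcast : a % b = ((a.toNat % b.toNat : Nat) : Int) := by
        rw [Int.natCast_mod, Int.toNat_of_nonneg ha, Int.toNat_of_nonneg hb]
      rw [hmod, hcast, Int.toNat_natCast]
    rw [htn, Nat.gcd_comm b.toNat, ← Nat.gcd_rec b.toNat a.toNat, Nat.gcd_comm]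
  | case2 a b h =>
    intro ha hb
    have hb0 : b = 0 := le_antisymm (not_lt.mp h) hb
    rw [euclidB, dif_neg h, hb0]
    simp [Int.toNat_of_nonneg ha]

lemma pathLoopA_run (n m step : Int) (hn : 0 < n)
    (hst : step = PySem.Int.mod (m - 1) n) (c : Nat)
    (hc : c = n.toNat / Nat.gcd n.toNat step.toNat) :
    ∀ (fuel j : Nat) (acc : List String), j < c → c - j ≤ fuel →
      pathLoopA n m fuel (PySem.Int.mod ((j : Int) * step) n + 1) acc
        = acc ++ (List.range (c - j)).map
            (fun i => PySem.Int.toStr (PySem.Int.mod (((j + i : Nat) : Int) * step) n + 1)) := by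
  have hmodn : ∀ x : Int, PySem.Int.mod x n = x % n :=
    fun x => PySem.Int.mod_eq_emod_of_pos (a := x) hn
  have hstep0 : 0 ≤ step := hst ▸ PySem.Int.mod_nonneg _ hn
  have hsteplt : step < n := hst ▸ PySem.Int.mod_lt _ hn
  have hms : (m - 1) % n = step := by rw [hst, hmodn]
  have hse : step % n = step := Int.emod_eq_of_lt hstep0 hsteplt
  -- one arithmetic step of the walk
  have he : ∀ j : Nat, (PySem.Int.mod ((j : Int) * step) n + 1) + m - 2
      = ((j : Int) * step) % n + (m - 1) := by intro j; rw [hmodn]; ring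
  have hstepmod : ∀ j : Nat, (((j : Int) * step) % n + (m - 1)) % n = (((j : Int) + 1) * step) % n := by
    intro j
    rw [Int.emod_add_emod, Int.add_emod ((j:Int)*step) (m-1), hms]
    conv_rhs => rw [show ((j:Int)+1)*step = (j:Int)*step + step from by ring, Int.add_emod, hse]
  -- termination test: the walk returns to 1 exactly when c ∣ j+1
  have hdvd : ∀ j : Nat, ((((j : Int) + 1) * step) % n = 0 ↔ c ∣ (j + 1)) := by
    intro j
    have h1 : (((j : Int) + 1) * step) = (((j + 1) * step.toNat : Nat) : Int) := by
      push_cast [Int.toNat_of_nonneg hstep0]; ring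
    have h2 : n = ((n.toNat : Nat) : Int) := (Int.toNat_of_nonneg hn.le).symm
    rw [PySem.Int.emod_eq_zero_iff_dvd, h1, h2, Int.natCast_dvd_natCast, hc]
    exact dvd_mul_iff_orbit n.toNat step.toNat (by omega) (j + 1)
  intro fuel
  induction fuel with
  | zero => intro j acc hj hfuel; omega
  | succ f ih =>
    intro j acc hj hfuel
    simp only [pathLoopA]
    rw [he j, hmodn ((j : Int) * step % n + (m - 1)), hstepmod j]
    by_cases hbr : j + 1 = c
    · have h0 : (((j : Int) + 1) * step) % n = 0 := by
        rw [hdvd j, hbr]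
      rw [h0]
      norm_num
      have hcj : c - j = 1 := by omega
      rw [hcj]
      simp [List.range_one]
    · have h0 : (((j : Int) + 1) * step) % n ≠ 0 := by
        intro hdv0
        have hdv := (hdvd j).mp hdv0
        exact hbr (le_antisymm (by omega) (Nat.le_of_dvd (by omega) hdv))
      have hmn : 0 ≤ (((j : Int) + 1) * step) % n := Int.emod_nonneg _ (by omega)
      have hne : ¬ ((((j : Int) + 1) * step) % n + 1 = 1) := by omega
      rw [if_neg hne, ← hmodn ((((j : Int) + 1) * step))]
      have hcast : ((j : Int) + 1) = (((j + 1 : Nat)) : Int) := by push_cast; ring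
      rw [hcast, ih (j + 1) (acc ++ [PySem.Int.toStr (PySem.Int.mod ((j : Int) * step) n + 1)])
        (by omega) (by omega)]
      rw [List.append_assoc]
      congr 1
      have hcj : c - j = (c - (j + 1)) + 1 := by omega
      rw [hcj, List.range_succ_eq_map, List.map_cons, List.map_map]
      simp only [Nat.add_zero, List.singleton_append]
      congr 1
      apply List.map_congr_left
      intro i _
      simp only [Function.comp]
      have harg : j + i.succ = j + 1 + i := by omega
      rw [harg]

lemma path_for_eq_alt (n m : Int) (hn : 0 < n) (hm : 0 < m) : path_for n m = path_for_alt n m := by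
  unfold path_for path_for_alt
  have hcond : ¬ (n ≤ 0 ∨ m ≤ 0) := by omega
  rw [if_neg hcond, if_neg hcond]
  have hst : PySem.Int.mod (m - 1) n = PySem.Int.mod (m - 1) n := rfl
  set step := PySem.Int.mod (m - 1) n with hstdef
  have hstep0 : 0 ≤ step := PySem.Int.mod_nonneg _ hn
  have hg : euclidB n step = (Nat.gcd n.toNat step.toNat : Int) := euclidB_gcd n step hn.le hstep0
  have hgpos : 0 < Nat.gcd n.toNat step.toNat := Nat.gcd_pos_of_pos_left _ (by omega)
  set c := n.toNat / Nat.gcd n.toNat step.toNat with hc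
  have hcount : PySem.Int.floordiv n (euclidB n step) = (c : Int) := by
    rw [hg, PySem.Int.floordiv_eq_ediv_of_pos (by exact_mod_cast hgpos)]
    rw [show n = ((n.toNat : Nat) : Int) from (Int.toNat_of_nonneg hn.le).symm]
    rw [hc]
    exact (Int.natCast_div _ _).symm
  have hcpos : 0 < c := Nat.div_pos (Nat.le_of_dvd (by omega) (Nat.gcd_dvd_left _ _)) hgpos
  have hcle : c ≤ n.toNat := Nat.div_le_self _ _
  have hA := pathLoopA_run n m step hn hstdef c hc n.toNat 0 [] hcpos (by omega)
  have hstart : PySem.Int.mod (((0 : Nat) : Int) * step) n + 1 = 1 := by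
    rw [PySem.Int.mod_eq_emod_of_pos (a := ((0:Nat):Int) * step) hn]
    simp
  rw [hstart] at hA
  rw [hA]
  simp only [hcount]
  congr 1
  rw [PySem.List.pyRange_one 0 (c : Int)]
  simp only [sub_zero, Int.toNat_natCast, List.map_map, Nat.sub_zero, List.nil_append]
  apply List.map_congr_left
  intro i _
  simp [Function.comp, zero_add]

-- ===== VERDICT (by name: the statement is the Claim_ definition above) =====
theorem path_for_spec : Claim_equal_path_for := by
  intro n m _ hpre
  exact path_for_eq_alt n m hpre.1 hpre.2
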